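-- pv_equiv track=rewrite | github.com/seho0726/BaekJoon | 프로그래머스/2/138476. 귤 고르기/귤 고르기.py | solution
-- ===== SOURCE A (Python) =====
-- def solution(k, tangerine):
--     table = [0] * 10000001
--
--     # 해시 테이블
--     for i in tangerine:
--         table[i] += 1
--
--     table.sort(reverse=True)
--
--     i = 0
--     while k > 0:
--         k = k - table[i]
--         i += 1
--
--     answer = i
--     return answer
-- ===== SOURCE B (Python) =====
-- def solution(k, tangerine):
--     freq = {}
--     for t in tangerine:
--         freq[t] = freq.get(t, 0) + 1
--     counts = freq.values()
--     maxf = max(counts, default=0)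
--     bucket = [0] * (maxf + 1)
--     for c in counts:
--         bucket[c] += 1
--     answer = 0
--     f = maxf
--     while f > 0:
--         for _ in range(bucket[f]):
--             if k <= 0:
--                 return answer
--             k -= f
--             answer += 1
--         f -= 1
--     return answer
-- ===== Notes on version B (the rewrite author's own statement) =====
-- stated objective: faster
-- what changed: B counts frequencies in a dict and sweeps a small frequency histogram from the highest frequency down, instead of allocating a fixed 10000001-entry table and comparison-sorting it on every call.
-- outside the precondition, e.g. on solution(2, [-1, 10000000]): A returns 1, B returns 2
import Mathlib
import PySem

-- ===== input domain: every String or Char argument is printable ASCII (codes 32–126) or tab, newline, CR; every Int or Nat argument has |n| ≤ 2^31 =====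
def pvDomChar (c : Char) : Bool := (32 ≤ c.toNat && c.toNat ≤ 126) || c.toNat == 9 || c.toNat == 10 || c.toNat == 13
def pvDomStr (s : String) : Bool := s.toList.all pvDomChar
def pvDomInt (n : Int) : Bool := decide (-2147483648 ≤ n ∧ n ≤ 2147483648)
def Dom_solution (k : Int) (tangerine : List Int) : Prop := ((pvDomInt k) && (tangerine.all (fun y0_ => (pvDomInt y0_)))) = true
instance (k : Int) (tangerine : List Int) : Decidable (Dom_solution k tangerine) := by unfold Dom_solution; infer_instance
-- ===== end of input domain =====

-- B replaces A's fixed 10000001-entry table and its full comparison sort by a frequency dict and a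
-- small descending histogram sweep (objective: faster, by a large constant factor).

-- ===== PORT A =====
-- A's `table` is a Python list of 10000001 int counters: ported as `Array Nat`, Python list item
-- read/write with Python's negative-index rule (out-of-range = IndexError, which Pre_ excludes,
-- so the unchanged-array arm is never observed inside Pre_).
def pyArrGet (t : Array Nat) (v : Int) : Nat :=
  let j := if v < 0 then v + t.size else v
  if 0 ≤ j then t.getD j.toNat 0 else 0

def pyArrSet (t : Array Nat) (v : Int) (x : Nat) : Array Nat :=
  let j := if v < 0 then v + t.size else v
  if 0 ≤ j then t.setIfInBounds j.toNat x else t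

-- the `while k > 0: k -= table[i]; i += 1` loop; at i = len(table) Python raises IndexError
-- (outside Pre_), the port stops there with the current i
def solutionLoop (t : Array Nat) (k : Int) (i : Nat) : Int :=
  if k > 0 then
    if h : i < t.size then solutionLoop t (k - (t[i] : Int)) (i + 1) else (i : Int)
  else (i : Int)
  termination_by t.size - i
  decreasing_by omega

-- A: count into the 10000001-slot table, sort it descending (`table.sort(reverse=True)`:
-- stable sort of ints, value-equal to ascending mergeSort reversed), then greedy-scan by index.
def solution (k : Int) (tangerine : List Int) : Int :=
  let table := tangerine.foldl (fun t v => pyArrSet t v (pyArrGet t v + 1)) (Array.replicate 10000001 0)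
  let table := ((table.toList.mergeSort Nat.ble).reverse).toArray
  solutionLoop table k 0

-- ===== PORT B =====
-- inner `for _ in range(bucket[f])` with the early `return answer`: .inr = returned, .inl = loop done
def solutionAltInner (f : Int) (cnt : Nat) (k ans : Int) : (Int × Int) ⊕ Int :=
  match cnt with
  | 0 => .inl (k, ans)
  | c + 1 => if k ≤ 0 then .inr ans else solutionAltInner f c (k - f) (ans + 1)

-- outer `while f > 0: … f -= 1` sweep, f counting down
def solutionAltSweep (bucket : List Int) : Nat → Int → Int → Int
  | 0, _, ans => ans
  | fp + 1, k, ans =>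
    match solutionAltInner ((fp + 1 : Nat) : Int) (PySem.List.pyGetD bucket ((fp + 1 : Nat) : Int) 0).toNat k ans with
    | .inr a => a
    | .inl (k', a') => solutionAltSweep bucket fp k' a'

def solution_alt (k : Int) (tangerine : List Int) : Int :=
  let freq := tangerine.foldl (fun d x => d.insert x (d.getD x 0 + 1)) (PySem.Dict.empty : PySem.Dict Int Int)
  let counts := freq.values
  let maxf := PySem.List.maxD counts (fun x => x) 0
  let bucket := counts.foldl (fun b c => PySem.List.pySetD b c (PySem.List.pyGetD b c 0 + 1))
    (PySem.List.pyRepeat [(0 : Int)] (maxf + 1))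
  solutionAltSweep bucket maxf.toNat k 0

-- ===== PRECONDITION & SPEC =====
-- Pre_ excludes exactly: inputs where A raises IndexError (a size outside [-10000001, 10000000],
-- or k exceeding the number of tangerines, which runs the loop off the table), and lists holding
-- both v and v + 10000001, where A's fixed-size table accidentally merges the two distinct sizes
-- through Python's negative-index wraparound.
def Pre_solution (k : Int) (tangerine : List Int) : Prop :=
  k ≤ (tangerine.length : Int) ∧
  (∀ v ∈ tangerine, -10000001 ≤ v ∧ v < 10000001) ∧
  (∀ v ∈ tangerine, ∀ w ∈ tangerine, v + 10000001 ≠ w)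
instance (k : Int) (tangerine : List Int) : Decidable (Pre_solution k tangerine) := by
  unfold Pre_solution; infer_instance

def pvWitness_solution : Int × List Int := (3, [2, 2, 5])

def Spec_solution (k : Int) (tangerine : List Int) (out : Int) : Prop := out = solution_alt k tangerine
instance (k : Int) (tangerine : List Int) (out : Int) : Decidable (Spec_solution k tangerine out) := by
  unfold Spec_solution; infer_instance

-- ===== CLAIM (what is proved, stated in full; the proofs are below) =====
def Claim_equal_solution : Prop := ∀ (k : Int) (tangerine : List Int), Dom_solution k tangerine → Pre_solution k tangerine → Spec_solution k tangerine (solution k tangerine)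


-- ===== LEMMAS AND PROOFS =====

def greedyN (k : Int) : List Nat → Int
  | [] => 0
  | c :: r => if k > 0 then 1 + greedyN (k - (c : Int)) r else 0

def greedyI (k : Int) : List Int → Int
  | [] => 0
  | c :: r => if k > 0 then 1 + greedyI (k - c) r else 0

theorem loop_eq_greedy (t : Array Nat) (k : Int) (i : Nat) :
    solutionLoop t k i = (i : Int) + greedyN k (t.toList.drop i) := by
  by_cases hk : k > 0
  · by_cases h : i < t.size
    · rw [solutionLoop]
      simp only [hk, if_true, dif_pos h]
      have hd : t.toList.drop i = t[i] :: t.toList.drop (i+1) := by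
        rw [List.drop_eq_getElem_cons (by simpa using h)]
        simp
      rw [loop_eq_greedy t (k - (t[i] : Int)) (i + 1), hd]
      simp only [greedyN, hk, if_true]
      push_cast
      ring
    · rw [solutionLoop]
      simp only [hk, if_true, dif_neg h]
      rw [List.drop_of_length_le (by simpa using Nat.le_of_not_lt h)]
      simp [greedyN]
  · rw [solutionLoop]
    simp only [hk, if_false]
    cases hd : t.toList.drop i with
    | nil => simp [greedyN]
    | cons c r => simp [greedyN, hk]
  termination_by t.size - i
  decreasing_by omega

theorem greedy_append_zeros (k : Int) (l : List Nat) (zs : List Nat)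
    (hsum : k ≤ (l.sum : Int)) (hz : ∀ z ∈ zs, z = 0) :
    greedyN k (l ++ zs) = greedyN k l := by
  induction l generalizing k with
  | nil =>
    simp only [List.sum_nil, Nat.cast_zero] at hsum
    cases zs with
    | nil => rfl
    | cons z r =>
      simp only [List.nil_append, greedyN]
      rw [if_neg (by omega)]
  | cons c r ih =>
    simp only [List.cons_append, greedyN]
    split
    · rw [ih _ (by simp only [List.sum_cons] at hsum; push_cast at hsum ⊢; omega)]
    · rfl

theorem inner_eq_greedy (f : Int) (cnt : Nat) (k ans : Int) (L : List Int) :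
    (match solutionAltInner f cnt k ans with
     | .inr a => a
     | .inl (k', a') => a' + greedyI k' L) = ans + greedyI k (List.replicate cnt f ++ L) := by
  induction cnt generalizing k ans with
  | zero => simp [solutionAltInner]
  | succ c ih =>
    by_cases hk : k ≤ 0
    · simp [solutionAltInner, if_pos hk, List.replicate_succ, greedyI, if_neg (show ¬ k > 0 by omega)]
    · simp only [solutionAltInner, if_neg hk, List.replicate_succ, List.cons_append, greedyI,
        if_pos (show k > 0 by omega)]
      rw [ih]
      ring

def flatB (bucket : List Int) : Nat → List Int
  | 0 => []
  | f + 1 => List.replicate (PySem.List.pyGetD bucket ((f + 1 : Nat) : Int) 0).toNat ((f + 1 : Nat) : Int) ++ flatB bucket f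

theorem sweep_eq_greedy (bucket : List Int) (f : Nat) (k ans : Int) :
    solutionAltSweep bucket f k ans = ans + greedyI k (flatB bucket f) := by
  induction f generalizing k ans with
  | zero => simp [solutionAltSweep, flatB, greedyI]
  | succ fp ih =>
    rw [solutionAltSweep, flatB, ← inner_eq_greedy]
    cases h : solutionAltInner ((fp + 1 : Nat) : Int) (PySem.List.pyGetD bucket ((fp + 1 : Nat) : Int) 0).toNat k ans with
    | inr a => simp
    | inl p =>
      obtain ⟨k', a'⟩ := p
      simpa using ih k' a'

theorem greedy_map_cast (k : Int) (l : List Nat) :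
    greedyI k (l.map (Nat.cast : Nat → Int)) = greedyN k l := by
  induction l generalizing k with
  | nil => rfl
  | cons c r ih => simp only [List.map_cons, greedyI, greedyN]; rw [ih]

theorem hist_length_nat (ids : List Nat) (l : List Nat) :
    (ids.foldl (fun acc j => acc.set j (acc.getD j 0 + 1)) l).length = l.length := by
  induction ids generalizing l with
  | nil => rfl
  | cons i r ih => rw [List.foldl_cons, ih, List.length_set]

theorem hist_getD_nat (ids : List Nat) (l : List Nat) (j : Nat)
    (hj : j < l.length) (hin : ∀ i ∈ ids, i < l.length) :
    (ids.foldl (fun acc j => acc.set j (acc.getD j 0 + 1)) l).getD j 0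
      = l.getD j 0 + ids.count j := by
  induction ids generalizing l with
  | nil => simp
  | cons i r ih =>
    have hi : i < l.length := hin i (by simp)
    rw [List.foldl_cons,
        ih (l.set i (l.getD i 0 + 1)) (by simpa using hj)
          (fun x hx => by simpa using hin x (by simp [hx]))]
    rw [List.getD_eq_getElem _ _ (by simpa using hj), List.getD_eq_getElem _ _ hj,
        List.getElem_set]
    by_cases h : i = j
    · subst h
      rw [if_pos rfl, List.count_cons_self, List.getD_eq_getElem _ _ hi]
      omega
    · rw [if_neg h]
      have : List.count j (i :: r) = List.count j r := by simp [h]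
      rw [this]

theorem hist_length_int (ids : List Nat) (l : List Int) :
    (ids.foldl (fun acc j => acc.set j (acc.getD j 0 + 1)) l).length = l.length := by
  induction ids generalizing l with
  | nil => rfl
  | cons i r ih => rw [List.foldl_cons, ih, List.length_set]

theorem hist_getD_int (ids : List Nat) (l : List Int) (j : Nat)
    (hj : j < l.length) (hin : ∀ i ∈ ids, i < l.length) :
    (ids.foldl (fun acc j => acc.set j (acc.getD j 0 + 1)) l).getD j 0
      = l.getD j 0 + (ids.count j : Int) := by
  induction ids generalizing l with
  | nil => simp
  | cons i r ih =>
    have hi : i < l.length := hin i (by simp)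
    rw [List.foldl_cons,
        ih (l.set i (l.getD i 0 + 1)) (by simpa using hj)
          (fun x hx => by simpa using hin x (by simp [hx]))]
    rw [List.getD_eq_getElem _ _ (by simpa using hj), List.getD_eq_getElem _ _ hj,
        List.getElem_set]
    by_cases h : i = j
    · subst h
      rw [if_pos rfl, List.count_cons_self, List.getD_eq_getElem _ _ hi]
      push_cast; omega
    · rw [if_neg h]
      have : List.count j (i :: r) = List.count j r := by simp [h]
      rw [this]

-- histogram from all-zero start, as a map over range
theorem hist_replicate_nat (N : Nat) (ids : List Nat) (hin : ∀ i ∈ ids, i < N) :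
    ids.foldl (fun acc j => acc.set j (acc.getD j 0 + 1)) (List.replicate N 0)
      = (List.range N).map (fun j => ids.count j) := by
  apply List.ext_getElem
  · rw [hist_length_nat]; simp
  · intro j h1 h2
    have hj : j < N := by simpa using h2
    rw [← List.getD_eq_getElem _ _ h1,
        hist_getD_nat ids _ j (by simpa) (by simpa using hin)]
    simp [hj]

-- the A-side array fold, moved to lists
theorem fold_toList (xs : List Int) (t : Array Nat)
    (hin : ∀ v ∈ xs, -(t.size : Int) ≤ v ∧ v < (t.size : Int)) :
    (xs.foldl (fun t v => pyArrSet t v (pyArrGet t v + 1)) t).toList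
      = (xs.map (fun v => ((if v < 0 then v + (t.size : Int) else v)).toNat)).foldl
          (fun acc j => acc.set j (acc.getD j 0 + 1)) t.toList := by
  induction xs generalizing t with
  | nil => rfl
  | cons v r ih =>
    have hv := hin v (by simp)
    have hsz : (pyArrSet t v (pyArrGet t v + 1)).size = t.size := by
      simp only [pyArrSet]
      split <;> split <;> simp
    rw [List.foldl_cons, List.map_cons, List.foldl_cons,
        ih _ (by rw [hsz]; exact fun w hw => hin w (by simp [hw])), hsz]
    congr 1
    have hj0 : (0 : Int) ≤ if v < 0 then v + (t.size : Int) else v := by split <;> omega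
    have hjlt : ((if v < 0 then v + (t.size : Int) else v)).toNat < t.size := by
      split <;> omega
    simp only [pyArrSet, pyArrGet, if_pos hj0]
    rw [Array.toList_setIfInBounds]
    congr 1
    rw [Array.getD_eq_getD_getElem?, List.getD_eq_getElem?_getD, ← Array.getElem?_toList]

theorem countP_eq_of_support {l₁ l₂ : List Nat} (p : Nat → Bool) (h₁ : l₁.Nodup) (h₂ : l₂.Nodup)
    (hsub : l₂ ⊆ l₁) (hsupp : ∀ j ∈ l₁, p j = true → j ∈ l₂) : l₁.countP p = l₂.countP p := by
  rw [List.countP_eq_length_filter, List.countP_eq_length_filter]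
  apply List.Perm.length_eq
  rw [List.perm_ext_iff_of_nodup (h₁.filter p) (h₂.filter p)]
  intro a
  simp only [List.mem_filter]
  exact ⟨fun ⟨ha, hp⟩ => ⟨hsupp a ha hp, hp⟩, fun ⟨ha, hp⟩ => ⟨hsub ha, hp⟩⟩

theorem count_map' {α β : Type} [BEq β] (l : List α) (f : α → β) (c : β) :
    (l.map f).count c = l.countP (fun a => f a == c) := by
  rw [List.count, List.countP_map]; rfl

theorem fiber_count (t : List Int) (msl' : Int → Nat)
    (hinj : ∀ v ∈ t, ∀ w ∈ t, msl' v = msl' w → v = w) (v : Int) (hv : v ∈ t) :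
    (t.map msl').count (msl' v) = t.count v := by
  rw [count_map']
  unfold List.count
  apply List.countP_congr
  intro w hw
  simp only [beq_iff_eq]
  exact ⟨fun h => hinj w hw v hv h, fun h => h ▸ rfl⟩

theorem table_perm (t : List Int) (msl' : Int → Nat) (N : Nat)
    (hlt : ∀ v ∈ t, msl' v < N)
    (hinj : ∀ v ∈ t, ∀ w ∈ t, msl' v = msl' w → v = w) :
    ((List.range N).map (fun j => (t.map msl').count j)).Perm
      ((PySem.Set.ofList t).map (fun v => t.count v) ++ List.replicate (N - (PySem.Set.ofList t).length) 0) := by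
  have hmem := PySem.Set.mem_ofList t
  have hdisnd := PySem.Set.nodup_ofList t
  have himgnd : ((PySem.Set.ofList t).map msl').Nodup :=
    List.Nodup.map_on (fun x hx y hy h => hinj x ((hmem x).1 hx) y ((hmem y).1 hy) h) hdisnd
  have himgsub : ((PySem.Set.ofList t).map msl') ⊆ List.range N := by
    intro j hj
    rcases List.mem_map.1 hj with ⟨v, hv, rfl⟩
    exact List.mem_range.2 (hlt v ((hmem v).1 hv))
  have hsupp : ∀ j ∈ List.range N, ((t.map msl').count j ≠ 0) → j ∈ (PySem.Set.ofList t).map msl' := by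
    intro j _ hne
    have : j ∈ t.map msl' := by
      by_contra hmemn
      exact hne (List.count_eq_zero.2 hmemn)
    rcases List.mem_map.1 this with ⟨v, hv, rfl⟩
    exact List.mem_map.2 ⟨v, (hmem v).2 hv, rfl⟩
  have hDlen : (PySem.Set.ofList t).length ≤ N := by
    have := (List.subperm_of_subset himgnd himgsub).length_le
    simpa using this
  rw [List.perm_iff_count]
  intro c
  rw [List.count_append, count_map', count_map', List.count_replicate]
  by_cases hc : c = 0
  · subst hc
    have hLHS : (List.range N).countP (fun j => (t.map msl').count j == 0)
        = N - (PySem.Set.ofList t).length := by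
      have hsplit := List.length_eq_countP_add_countP
        (p := fun j => (t.map msl').count j == 0) (l := List.range N)
      have hcompl : (List.range N).countP (fun a => decide ¬ ((fun j => (t.map msl').count j == 0) a = true))
          = (PySem.Set.ofList t).length := by
        rw [countP_eq_of_support _ (List.nodup_range) himgnd himgsub
              (fun j hj hp => hsupp j hj (by simpa using hp)),
            List.countP_map, List.countP_eq_length]
        intro v hv
        have : 0 < t.count v := List.count_pos_iff.2 ((hmem v).1 hv)
        have hfib := fiber_count t msl' hinj v ((hmem v).1 hv)
        simp only [Function.comp_apply, beq_iff_eq, decide_eq_true_eq, hfib]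
        omega
      rw [hcompl, List.length_range] at hsplit
      omega
    rw [hLHS]
    have hz : (PySem.Set.ofList t).countP (fun v => t.count v == 0) = 0 := by
      rw [List.countP_eq_zero]
      intro v hv
      have : 0 < t.count v := List.count_pos_iff.2 ((hmem v).1 hv)
      simp only [beq_iff_eq]
      omega
    rw [hz]
    simp
  · have hLHS : (List.range N).countP (fun j => (t.map msl').count j == c)
        = (PySem.Set.ofList t).countP (fun v => t.count v == c) := by
      rw [countP_eq_of_support _ (List.nodup_range) himgnd himgsub
            (fun j hj hp => hsupp j hj (by simp only [beq_iff_eq] at hp; omega)),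
          List.countP_map]
      apply List.countP_congr
      intro v hv
      simp only [Function.comp_apply, beq_iff_eq]
      rw [fiber_count t msl' hinj v ((hmem v).1 hv)]
    rw [hLHS]
    simp [Ne.symm hc]

def flatD (cs : List Nat) : Nat → List Nat
  | 0 => []
  | f + 1 => List.replicate (cs.count (f + 1)) (f + 1) ++ flatD cs f

theorem count_flatD (cs : List Nat) (f x : Nat) :
    (flatD cs f).count x = if 1 ≤ x ∧ x ≤ f then cs.count x else 0 := by
  induction f with
  | zero => simp [flatD]; omega
  | succ fp ih =>
    rw [flatD, List.count_append, ih, List.count_replicate]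
    by_cases h : x = fp + 1
    · subst h
      rw [if_pos (by simp), if_neg (by omega), if_pos (by omega)]
      omega
    · have h2 : ((fp + 1 : Nat) == x) = false := by simp; omega
      rw [h2]
      simp only [Bool.false_eq_true, if_false, Nat.zero_add]
      by_cases h3 : 1 ≤ x ∧ x ≤ fp
      · rw [if_pos h3, if_pos (by omega)]
      · rw [if_neg h3, if_neg (by omega)]

theorem flatD_perm (cs : List Nat) (F : Nat) (h1 : ∀ c ∈ cs, 1 ≤ c) (h2 : ∀ c ∈ cs, c ≤ F) :
    (flatD cs F).Perm cs := by
  rw [List.perm_iff_count]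
  intro x
  rw [count_flatD]
  by_cases h : 1 ≤ x ∧ x ≤ F
  · rw [if_pos h]
  · rw [if_neg h]
    have : x ∉ cs := fun hx => h ⟨h1 x hx, h2 x hx⟩
    simp [List.count_eq_zero.2 this]

theorem mem_flatD (cs : List Nat) (f x : Nat) (h : x ∈ flatD cs f) : 1 ≤ x ∧ x ≤ f := by
  induction f with
  | zero => simp [flatD] at h
  | succ fp ih =>
    rw [flatD, List.mem_append] at h
    rcases h with h | h
    · rcases List.eq_of_mem_replicate h with rfl; omega
    · have := ih h; omega

theorem pairwise_flatD (cs : List Nat) (f : Nat) :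
    (flatD cs f).Pairwise (fun a b => b ≤ a) := by
  induction f with
  | zero => simp [flatD]
  | succ fp ih =>
    rw [flatD, List.pairwise_append]
    refine ⟨List.pairwise_replicate.2 (by omega), ih, ?_⟩
    intro a ha b hb
    rcases List.eq_of_mem_replicate ha with rfl
    have := mem_flatD cs fp b hb
    omega

theorem desc_unique {l m : List Nat} (hperm : l.Perm m)
    (hl : l.Pairwise (fun a b => b ≤ a)) (hm : m.Pairwise (fun a b => b ≤ a)) : l = m :=
  List.Perm.eq_of_pairwise (fun _ _ _ _ h1 h2 => Nat.le_antisymm h2 h1) hl hm hperm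

theorem mergeRev_pairwise (L : List Nat) :
    ((L.mergeSort Nat.ble).reverse).Pairwise (fun a b => b ≤ a) := by
  rw [List.pairwise_reverse]
  have := List.pairwise_mergeSort (le := Nat.ble)
    (fun a b c h1 h2 => by simp only [Nat.ble_eq] at *; omega)
    (fun a b => by simpa [Nat.ble_eq] using Nat.le_total a b) L
  exact this.imp (by simp [Nat.ble_eq])

theorem mergeRev_perm (L : List Nat) : ((L.mergeSort Nat.ble).reverse).Perm L :=
  (List.reverse_perm _).trans (List.mergeSort_perm L _)

-- counts over the distinct elements sum to the length
theorem sum_counts_eq_length (t : List Int) :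
    ((PySem.Set.ofList t).map (fun v => t.count v)).sum = t.length := by
  have hperm : (PySem.Set.ofList t).Perm t.dedup := by
    rw [List.perm_ext_iff_of_nodup (PySem.Set.nodup_ofList t) t.nodup_dedup]
    intro a
    rw [PySem.Set.mem_ofList, List.mem_dedup]
  have := List.sum_map_count_dedup_eq_length t
  rw [← this]
  exact (hperm.map (fun v => t.count v)).sum_eq


-- ===== main equivalence =====
def mslF (v : Int) : Nat := (if v < 0 then v + 10000001 else v).toNat

theorem main_equal (k : Int) (tangerine : List Int) (hpre : Pre_solution k tangerine) :
    solution k tangerine = solution_alt k tangerine := by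
  obtain ⟨hk, hbnd, hnocol⟩ := hpre
  -- abbreviations
  set t := tangerine with ht
  have hmem := PySem.Set.mem_ofList t
  set dis := PySem.Set.ofList t with hdis
  set countsN : List Nat := dis.map (fun v => t.count v) with hcountsN
  have hlt : ∀ v ∈ t, mslF v < 10000001 := by
    intro v hv
    have := hbnd v hv
    simp only [mslF]
    split <;> omega
  have hinj : ∀ v ∈ t, ∀ w ∈ t, mslF v = mslF w → v = w := by
    intro v hv w hw h
    have hbv := hbnd v hv
    have hbw := hbnd w hw
    have h1 := hnocol v hv w hw
    have h2 := hnocol w hw v hv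
    simp only [mslF] at h
    split at h <;> split at h <;> omega
  -- counts are positive
  have hpos : ∀ c ∈ countsN, 1 ≤ c := by
    intro c hc
    rcases List.mem_map.1 hc with ⟨v, hv, rfl⟩
    exact List.count_pos_iff.2 ((hmem v).1 hv)
  -- ===== B side =====
  rw [solution_alt]
  rw [PySem.Dict.foldl_insert_getD_add_one_eq_counter]
  have hvals : (PySem.Dict.counter t).values = countsN.map (Nat.cast : Nat → Int) := by
    show ((PySem.Dict.counter t).items).map (·.2) = _
    rw [PySem.Dict.items_counter, List.map_map, hcountsN, List.map_map]
    rfl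
  rw [hvals]
  set maxf : Int := PySem.List.maxD (countsN.map (Nat.cast : Nat → Int)) (fun x => x) 0 with hmaxf
  have hmaxnn : 0 ≤ maxf := by
    rw [hmaxf]
    unfold PySem.List.maxD
    cases hmx : PySem.List.max? (countsN.map (Nat.cast : Nat → Int)) (fun x => x) with
    | none => simp
    | some m =>
      have := PySem.List.max?_mem hmx
      rcases List.mem_map.1 this with ⟨c, _, rfl⟩
      simp
  set F : Nat := maxf.toNat with hF
  have hcle : ∀ c ∈ countsN, c ≤ F := by
    intro c hc
    have hmem' : (c : Int) ∈ countsN.map (Nat.cast : Nat → Int) := List.mem_map.2 ⟨c, hc, rfl⟩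
    have : (c : Int) ≤ maxf := by
      rw [hmaxf]
      unfold PySem.List.maxD
      cases hmx : PySem.List.max? (countsN.map (Nat.cast : Nat → Int)) (fun x => x) with
      | none => exact absurd (List.map_eq_nil_iff.1 ((PySem.List.max?_eq_none_iff _ _).1 hmx) ▸ hc) (by simp [List.map_eq_nil_iff.1 ((PySem.List.max?_eq_none_iff _ _).1 hmx)] at hc ⊢)
      | some m => simpa using PySem.List.max?_isMax hmx _ hmem'
    omega
  -- the bucket list is the count histogram of countsN
  have hbucket :
      (countsN.map (Nat.cast : Nat → Int)).foldl
          (fun b c => PySem.List.pySetD b c (PySem.List.pyGetD b c 0 + 1))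
          (PySem.List.pyRepeat [(0 : Int)] (maxf + 1))
        = countsN.foldl (fun acc j => acc.set j (acc.getD j 0 + 1)) (List.replicate (F + 1) (0 : Int)) := by
    rw [PySem.List.pyRepeat_singleton, List.foldl_map]
    have hrep : (maxf + 1).toNat = F + 1 := by omega
    rw [hrep]
    congr 1
    funext b c
    rw [PySem.List.pySetD_of_nonneg _ _ (by positivity), PySem.List.pyGetD_natCast]
    simp
  rw [hbucket]
  set bucket := countsN.foldl (fun acc j => acc.set j (acc.getD j 0 + 1)) (List.replicate (F + 1) (0 : Int)) with hbkt
  have hblen : bucket.length = F + 1 := by rw [hbkt, hist_length_int, List.length_replicate]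
  have hbgetD : ∀ j, j < F + 1 → bucket.getD j 0 = (countsN.count j : Int) := by
    intro j hj
    rw [hbkt, hist_getD_int countsN _ j (by simpa using hj) (fun i hi => by simpa using Nat.lt_succ_of_le (hcle i hi))]
    simp
  have hflatB : ∀ f, f ≤ F → flatB bucket f = (flatD countsN f).map (Nat.cast : Nat → Int) := by
    intro f
    induction f with
    | zero => intro _; rfl
    | succ fp ih =>
      intro hfF
      rw [flatB, flatD, ih (by omega), List.map_append, List.map_replicate]
      have : PySem.List.pyGetD bucket ((fp + 1 : Nat) : Int) 0 = (countsN.count (fp + 1) : Int) := by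
        rw [PySem.List.pyGetD_natCast]
        rw [List.getD_eq_getElem?_getD, ← List.getD_eq_getElem?_getD]
        exact hbgetD (fp + 1) (by omega)
      rw [this]
      simp
  rw [sweep_eq_greedy, hflatB F (le_refl F), greedy_map_cast]
  -- ===== A side =====
  rw [solution]
  rw [loop_eq_greedy]
  simp only [List.drop_zero, Nat.cast_zero, zero_add]
  have htable :
      (t.foldl (fun tb v => pyArrSet tb v (pyArrGet tb v + 1)) (Array.replicate 10000001 0)).toList
        = (List.range 10000001).map (fun j => (t.map mslF).count j) := by
    rw [fold_toList t _ (by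
      intro v hv
      have := hbnd v hv
      constructor <;> simp <;> omega)]
    have hfun : (fun v => ((if v < 0 then v + ((Array.replicate 10000001 (0:Nat)).size : Int) else v)).toNat) = mslF := by
      funext v
      simp [mslF, Array.size_replicate]
    rw [hfun, Array.toList_replicate]
    exact hist_replicate_nat 10000001 (t.map mslF)
      (by
        intro i hi
        rcases List.mem_map.1 hi with ⟨v, hv, rfl⟩
        exact hlt v hv)
  rw [htable]
  -- the sorted table is the descending flat list followed by zeros
  have hsorted :
      ((((List.range 10000001).map (fun j => (t.map mslF).count j)).mergeSort Nat.ble).reverse)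
        = flatD countsN F ++ List.replicate (10000001 - dis.length) 0 := by
    apply desc_unique
    · exact (mergeRev_perm _).trans
        ((table_perm t mslF 10000001 hlt hinj).trans
          ((flatD_perm countsN F hpos hcle).symm.append_right _))
    · exact mergeRev_pairwise _
    · rw [List.pairwise_append]
      refine ⟨pairwise_flatD _ _, List.pairwise_replicate.2 (by omega), ?_⟩
      intro a _ b hb
      rcases List.eq_of_mem_replicate hb with rfl
      omega
  rw [hsorted]
  have hs : (flatD countsN F).sum = t.length := by
    rw [(flatD_perm countsN F hpos hcle).sum_eq]
    exact sum_counts_eq_length t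
  rw [greedy_append_zeros k _ _ (by rw [hs]; exact hk) (fun z hz => List.eq_of_mem_replicate hz)]


-- ===== VERDICT (by name: the statement is the Claim_ definition above) =====
theorem solution_spec : Claim_equal_solution := by
  intro k t _ hpre
  unfold Spec_solution
  exact main_equal k t hpre
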